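-- pv_equiv track=rewrite | github.com/epoyraz/leetcode | solutions/1344.py | maxEqualFreq
-- ===== SOURCE A (Python) =====
-- from collections import Counter, defaultdict
--
-- def maxEqualFreq(nums):
--     count = Counter()
--     freq = defaultdict(int)
--     res = 0
--     maxFreq = 0
--
--     for i, num in enumerate(nums):
--         prev = count[num]
--         if prev > 0:
--             freq[prev] -= 1
--         count[num] += 1
--         curr = count[num]
--         freq[curr] += 1
--         maxFreq = max(maxFreq, curr)
--
--         total = i + 1
--
--         if (
--             maxFreq == 1 or
--             freq[maxFreq] * maxFreq + freq[maxFreq - 1] * (maxFreq - 1) == total and freq[maxFreq] == 1 or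
--             freq[1] == 1 and freq[maxFreq] * maxFreq + 1 == total
--         ):
--             res = total
--
--     return res
-- ===== SOURCE B (Python) =====
-- from collections import Counter
--
-- def maxEqualFreq(nums):
--     # scan prefixes from longest to shortest, recomputing the frequency tables,
--     # and return the first (i.e. longest) valid prefix length
--     for i in range(len(nums), 0, -1):
--         count = Counter(nums[:i])
--         freq = Counter(count.values())
--         maxFreq = max(count.values())
--         if (
--             maxFreq == 1 or
--             freq[maxFreq] * maxFreq + freq[maxFreq - 1] * (maxFreq - 1) == i and freq[maxFreq] == 1 or
--             freq[1] == 1 and freq[maxFreq] * maxFreq + 1 == i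
--         ):
--             return i
--     return 0
-- ===== Notes on version B (the rewrite author's own statement) =====
-- stated objective: simpler
-- what changed: Replaces A's single pass with incremental count/freq/maxFreq bookkeeping by a back-to-front search over prefix lengths that recomputes the Counter tables from scratch for each prefix and returns the first (longest) valid one.
import Mathlib
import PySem

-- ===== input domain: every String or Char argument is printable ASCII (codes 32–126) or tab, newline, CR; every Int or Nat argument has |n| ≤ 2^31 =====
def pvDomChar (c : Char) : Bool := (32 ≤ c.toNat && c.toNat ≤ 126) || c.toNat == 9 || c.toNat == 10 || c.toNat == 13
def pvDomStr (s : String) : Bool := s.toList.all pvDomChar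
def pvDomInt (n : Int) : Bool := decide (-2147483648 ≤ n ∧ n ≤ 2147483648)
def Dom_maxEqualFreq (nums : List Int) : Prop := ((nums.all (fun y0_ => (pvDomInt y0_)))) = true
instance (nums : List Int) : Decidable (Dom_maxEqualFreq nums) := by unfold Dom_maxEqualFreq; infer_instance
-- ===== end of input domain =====

-- B replaces A's incremental one-pass bookkeeping by a longest-first prefix search that
-- recomputes the Counter tables per prefix (simpler state, no incremental updates).

-- ===== PORT A =====
-- state: (i, count, freq, res, maxFreq)
def pvAStep (s : Int × PySem.Dict Int Int × PySem.Dict Int Int × Int × Int) (num : Int) :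
    Int × PySem.Dict Int Int × PySem.Dict Int Int × Int × Int :=
  let i := s.1
  let count := s.2.1
  let freq := s.2.2.1
  let res := s.2.2.2.1
  let maxFreq := s.2.2.2.2
  let prev := count.getD num 0
  let freq := if prev > 0 then freq.modify prev 0 (· - 1) else freq
  let count := count.modify num 0 (· + 1)
  let curr := count.getD num 0
  let freq := freq.modify curr 0 (· + 1)
  let maxFreq := max maxFreq curr
  let total := i + 1
  let res :=
    if maxFreq == 1
        || (freq.getD maxFreq 0 * maxFreq + freq.getD (maxFreq - 1) 0 * (maxFreq - 1) == total
              && freq.getD maxFreq 0 == 1)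
        || (freq.getD 1 0 == 1 && freq.getD maxFreq 0 * maxFreq + 1 == total) then
      total
    else res
  (total, count, freq, res, maxFreq)

def maxEqualFreq (nums : List Int) : Int :=
  (nums.foldl pvAStep (0, PySem.Dict.empty, PySem.Dict.empty, 0, 0)).2.2.2.1

-- ===== PORT B =====
-- validity check of one prefix, from its recomputed Counter (the `none` arm of max? is
-- unreachable: the check is only applied to nonempty prefixes)
def pvBCheck (count : PySem.Dict Int Int) (i : Int) : Bool :=
  let freq := PySem.Dict.counter count.values
  let maxFreq := match PySem.List.max? count.values (fun v => v) with
    | some m => m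
    | none => 0
  maxFreq == 1
    || (freq.getD maxFreq 0 * maxFreq + freq.getD (maxFreq - 1) 0 * (maxFreq - 1) == i
          && freq.getD maxFreq 0 == 1)
    || (freq.getD 1 0 == 1 && freq.getD maxFreq 0 * maxFreq + 1 == i)

-- 'for i in range(len(nums), 0, -1): if valid(nums[:i]): return i' ; 'return 0'
def pvBLoop (nums : List Int) : List Int → Int
  | [] => 0
  | i :: rest =>
    if pvBCheck (PySem.Dict.counter (PySem.List.slice nums none (some i))) i then i
    else pvBLoop nums rest

def maxEqualFreq_alt (nums : List Int) : Int :=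
  pvBLoop nums (PySem.List.pyRange (nums.length : Int) 0 (-1))

-- ===== PRECONDITION & SPEC =====
def Spec_maxEqualFreq (nums : List Int) (out : Int) : Prop := out = maxEqualFreq_alt nums
instance (nums : List Int) (out : Int) : Decidable (Spec_maxEqualFreq nums out) := by unfold Spec_maxEqualFreq; infer_instance

-- ===== CLAIM (what is proved, stated in full; the proofs are below) =====
def Claim_equal_maxEqualFreq : Prop := ∀ (nums : List Int), Dom_maxEqualFreq nums → Spec_maxEqualFreq nums (maxEqualFreq nums)

-- ===== LEMMAS AND PROOFS =====

-- number of distinct elements of l whose multiplicity is k (as an Int)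
def pvF (l : List Int) (k : Int) : Int :=
  ((PySem.Set.ofList l).countP (fun x => ((l.count x : Int) == k)) : Int)

-- the multiplicities of the distinct elements of l, in first-occurrence order
def pvVals (l : List Int) : List Int :=
  (PySem.Set.ofList l).map (fun x => ((l.count x : Int)))

-- the maximal multiplicity (0 for the empty list)
def pvM (l : List Int) : Int := (pvVals l).foldl max 0

-- the three-way validity test of prefix l, in terms of pvF / pvM
def pvGood (l : List Int) : Bool :=
  let mf := pvM l
  let t : Int := (l.length : Int)
  mf == 1
    || (pvF l mf * mf + pvF l (mf - 1) * (mf - 1) == t && pvF l mf == 1)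
    || (pvF l 1 == 1 && pvF l mf * mf + 1 == t)

-- the longest valid prefix length among 1..n (0 if none)
def pvBest (l : List Int) : Nat → Int
  | 0 => 0
  | n + 1 => if pvGood (l.take (n + 1)) then ((n + 1 : Nat) : Int) else pvBest l n

lemma pv_ofList_snoc (l : List Int) (a : Int) :
    PySem.Set.ofList (l ++ [a]) = PySem.Set.add (PySem.Set.ofList l) a := by
  rw [PySem.Set.ofList_eq_foldl, PySem.Set.ofList_eq_foldl, List.foldl_append]
  rfl

lemma pv_countP_switch (s : List Int) (a : Int) (p q : Int → Bool)
    (hnd : s.Nodup) (ha : a ∈ s) (h : ∀ x ∈ s, x ≠ a → p x = q x) :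
    (s.countP q : Int) = (s.countP p : Int) - (if p a then 1 else 0) + (if q a then 1 else 0) := by
  induction s with
  | nil => cases ha
  | cons b t ih =>
    rcases List.nodup_cons.mp hnd with ⟨hbt, hndt⟩
    rw [List.countP_cons, List.countP_cons]
    by_cases hba : b = a
    · subst hba
      have hpq : t.countP p = t.countP q :=
        List.countP_congr (fun x hx => by
          rw [h x (List.mem_cons_of_mem _ hx) (fun hxa => hbt (hxa ▸ hx))])
      rw [hpq]
      push_cast
      split_ifs <;> omega
    · have ha' : a ∈ t := by
        rcases List.mem_cons.mp ha with h1 | h1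
        · exact absurd h1.symm hba
        · exact h1
      have hb : p b = q b := h b List.mem_cons_self hba
      have hrec := ih hndt ha' (fun x hx hxa => h x (List.mem_cons_of_mem _ hx) hxa)
      rw [hb]
      push_cast
      push_cast at hrec
      split_ifs at hrec ⊢ <;> omega

lemma pv_count_snoc (l : List Int) (a x : Int) :
    (l ++ [a]).count x = l.count x + (if x = a then 1 else 0) := by
  rw [List.count_append]
  congr 1
  by_cases h : x = a
  · simp [h]
  · simp [h, Ne.symm h]

lemma pv_ofList_snoc_mem (l : List Int) (a : Int) (hmem : a ∈ l) :
    PySem.Set.ofList (l ++ [a]) = PySem.Set.ofList l := by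
  rw [pv_ofList_snoc]
  unfold PySem.Set.add PySem.Set.contains
  rw [if_pos]
  simp [List.contains_eq_mem, (PySem.Set.mem_ofList l a).mpr hmem]

lemma pv_ofList_snoc_not_mem (l : List Int) (a : Int) (hmem : a ∉ l) :
    PySem.Set.ofList (l ++ [a]) = PySem.Set.ofList l ++ [a] := by
  rw [pv_ofList_snoc]
  unfold PySem.Set.add PySem.Set.contains
  rw [if_neg]
  simp only [List.contains_eq_mem, decide_eq_true_eq]
  intro hc
  exact hmem ((PySem.Set.mem_ofList l a).mp hc)

lemma pvF_snoc (l : List Int) (a k : Int) :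
    pvF (l ++ [a]) k = pvF l k
      - (if 0 < (l.count a : Int) ∧ k = (l.count a : Int) then 1 else 0)
      + (if k = (l.count a : Int) + 1 then 1 else 0) := by
  by_cases hmem : a ∈ l
  · have hcnt : 0 < l.count a := List.count_pos_iff.mpr hmem
    have hsw := pv_countP_switch (PySem.Set.ofList l) a
      (fun x => ((l.count x : Int) == k)) (fun x => (((l ++ [a]).count x : Int) == k))
      (PySem.Set.nodup_ofList l) ((PySem.Set.mem_ofList l a).mpr hmem)
      (fun x _ hxa => by simp only [pv_count_snoc, if_neg hxa, add_zero])
    unfold pvF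
    rw [pv_ofList_snoc_mem l a hmem, hsw]
    have h1 : (l ++ [a]).count a = l.count a + 1 := by
      rw [pv_count_snoc, if_pos rfl]
    simp only [h1, beq_iff_eq]
    push_cast
    split_ifs <;> omega
  · have hprev : l.count a = 0 := List.count_eq_zero.mpr hmem
    unfold pvF
    rw [pv_ofList_snoc_not_mem l a hmem, List.countP_append]
    have hcongr : (PySem.Set.ofList l).countP (fun x => (((l ++ [a]).count x : Int) == k))
        = (PySem.Set.ofList l).countP (fun x => ((l.count x : Int) == k)) := by
      apply List.countP_congr
      intro x hx
      have hxa : x ≠ a := fun hh => hmem (hh ▸ (PySem.Set.mem_ofList l x).mp hx)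
      simp only [pv_count_snoc, if_neg hxa, add_zero]
    rw [hcongr]
    have h1 : (l ++ [a]).count a = 1 := by
      rw [pv_count_snoc, hprev]
      simp
    simp only [List.countP_cons, List.countP_nil, h1, hprev, beq_iff_eq]
    push_cast
    simp only [false_and, if_false]
    split_ifs <;> omega

lemma pv_foldl_max_le (s : List Int) (f : Int → Int) (c : Int) :
    ∀ init, init ≤ c → (∀ x ∈ s, f x ≤ c) → s.foldl (fun acc y => max acc (f y)) init ≤ c := by
  induction s with
  | nil => exact fun _ h0 _ => h0
  | cons b t ih =>
    intro init h0 h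
    exact ih _ (max_le h0 (h b List.mem_cons_self)) (fun x hx => h x (List.mem_cons_of_mem _ hx))

lemma pv_foldl_max_bump (s : List Int) (f g : Int → Int) (a : Int)
    (ha : a ∈ s) (hne : ∀ x ∈ s, x ≠ a → g x = f x) (hfg : f a ≤ g a) :
    s.foldl (fun acc y => max acc (g y)) 0 = max (s.foldl (fun acc y => max acc (f y)) 0) (g a) := by
  have hf := PySem.List.le_foldl_max_int s f 0
  have hg := PySem.List.le_foldl_max_int s g 0
  apply le_antisymm
  · apply pv_foldl_max_le _ _ _ _
    · exact le_max_of_le_left hf.1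
    · intro x hx
      by_cases hxa : x = a
      · rw [hxa]; exact le_max_right _ _
      · rw [hne x hx hxa]
        exact le_max_of_le_left (hf.2 x hx)
  · apply max_le
    · apply pv_foldl_max_le _ _ _ _
      · exact hg.1
      · intro x hx
        by_cases hxa : x = a
        · rw [hxa]; exact le_trans hfg (hg.2 a ha)
        · rw [← hne x hx hxa]; exact hg.2 x hx
    · exact hg.2 a ha

lemma pvM_eq_foldl (l : List Int) :
    pvM l = (PySem.Set.ofList l).foldl (fun acc x => max acc ((l.count x : Int))) 0 := by
  unfold pvM pvVals
  rw [List.foldl_map]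

lemma pvM_snoc (l : List Int) (a : Int) :
    pvM (l ++ [a]) = max (pvM l) (((l ++ [a]).count a : Int)) := by
  by_cases hmem : a ∈ l
  · rw [pvM_eq_foldl, pvM_eq_foldl, pv_ofList_snoc_mem l a hmem]
    apply pv_foldl_max_bump _ _ _ a
    · exact (PySem.Set.mem_ofList l a).mpr hmem
    · intro x _ hxa; simp only [pv_count_snoc, if_neg hxa, add_zero]
    · simp only [pv_count_snoc]; push_cast; omega
  · rw [pvM_eq_foldl, pvM_eq_foldl, pv_ofList_snoc_not_mem l a hmem, List.foldl_append]
    have hcongr : (PySem.Set.ofList l).foldl (fun acc x => max acc (((l ++ [a]).count x : Int))) 0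
        = (PySem.Set.ofList l).foldl (fun acc x => max acc ((l.count x : Int))) 0 := by
      apply PySem.List.foldl_congr_mem
      intro acc x hx
      have hxa : x ≠ a := fun hh => hmem (hh ▸ (PySem.Set.mem_ofList l x).mp hx)
      simp only [pv_count_snoc, if_neg hxa, add_zero]
    rw [hcongr]
    simp

lemma pvBest_snoc_stable (l : List Int) (a : Int) :
    ∀ n, n ≤ l.length → pvBest (l ++ [a]) n = pvBest l n := by
  intro n
  induction n with
  | zero => intro _; rfl
  | succ m ih =>
    intro hle
    have htake : (l ++ [a]).take (m + 1) = l.take (m + 1) :=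
      List.take_append_of_le_length hle
    simp only [pvBest, htake, ih (Nat.le_of_succ_le hle)]

lemma pvA_inv (l : List Int) :
    (l.foldl pvAStep (0, PySem.Dict.empty, PySem.Dict.empty, 0, 0)).1 = (l.length : Int)
    ∧ (l.foldl pvAStep (0, PySem.Dict.empty, PySem.Dict.empty, 0, 0)).2.1 = PySem.Dict.counter l
    ∧ (∀ k, ((l.foldl pvAStep (0, PySem.Dict.empty, PySem.Dict.empty, 0, 0)).2.2.1).getD k 0 = pvF l k)
    ∧ (l.foldl pvAStep (0, PySem.Dict.empty, PySem.Dict.empty, 0, 0)).2.2.2.1 = pvBest l l.length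
    ∧ (l.foldl pvAStep (0, PySem.Dict.empty, PySem.Dict.empty, 0, 0)).2.2.2.2 = pvM l := by
  induction l using List.reverseRecOn with
  | nil =>
    refine ⟨rfl, rfl, ?_, rfl, rfl⟩
    intro k
    simp [pvF, PySem.Dict.getD_empty, PySem.Set.ofList]
  | append_singleton l a ih =>
    obtain ⟨hi, hc, hf, hr, hm⟩ := ih
    rw [List.foldl_append, List.foldl_cons, List.foldl_nil]
    set s := l.foldl pvAStep (0, PySem.Dict.empty, PySem.Dict.empty, 0, 0) with hs
    have hca : (((l ++ [a]).count a : Nat) : Int) = ((l.count a : Nat) : Int) + 1 := by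
      rw [pv_count_snoc, if_pos rfl]; push_cast; ring
    have hM : max (pvM l) (((l.count a : Nat) : Int) + 1) = pvM (l ++ [a]) := by
      rw [pvM_snoc, hca]
    have hlen : (((l ++ [a]).length : Nat) : Int) = ((l.length : Nat) : Int) + 1 := by
      simp
    simp only [pvAStep, hc, hm, hi, PySem.Dict.getD_counter,
      ← PySem.Dict.counter_append_singleton, hca, hM]
    have hmid : ∀ j : Int,
        ((if ((List.count a l : Nat) : Int) > 0 then
            s.2.2.1.modify (((List.count a l : Nat) : Int)) 0 (fun x => x - 1)
          else s.2.2.1)).getD j 0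
          = pvF l j - (if 0 < ((List.count a l : Nat) : Int) ∧ j = ((List.count a l : Nat) : Int) then 1 else 0) := by
      intro j
      by_cases hp : ((List.count a l : Nat) : Int) > 0
      · rw [if_pos hp, PySem.Dict.getD_modify]
        by_cases hj : j = ((List.count a l : Nat) : Int)
        · rw [if_pos hj, hj, if_pos ⟨hp, rfl⟩]
          simp only [hf]
        · rw [if_neg hj, hf, if_neg (fun hh => hj hh.2)]
          omega
      · rw [if_neg hp, hf, if_neg (fun hh => hp hh.1)]
        omega
    have hfreq : ∀ k : Int,
        ((if ((List.count a l : Nat) : Int) > 0 then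
            s.2.2.1.modify (((List.count a l : Nat) : Int)) 0 (fun x => x - 1)
          else s.2.2.1).modify (((List.count a l : Nat) : Int) + 1) 0 (fun x => x + 1)).getD k 0
          = pvF (l ++ [a]) k := by
      intro k
      rw [PySem.Dict.getD_modify, pvF_snoc]
      by_cases hk : k = ((List.count a l : Nat) : Int) + 1
      · rw [if_pos hk, hmid, hk]
        split_ifs <;> omega
      · rw [if_neg hk, hmid]
        split_ifs <;> omega
    refine ⟨hlen.symm, trivial, hfreq, ?_, trivial⟩
    simp only [hfreq]
    have hlen2 : (l ++ [a]).length = l.length + 1 := by simp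
    rw [hr, hlen2]
    simp only [pvBest]
    rw [show (l ++ [a]).take (l.length + 1) = l ++ [a] from by rw [← hlen2, List.take_length]]
    rw [pvBest_snoc_stable l a l.length le_rfl]
    simp only [pvGood, hlen2]
    push_cast
    rfl
lemma pv_vals_counter (l : List Int) : (PySem.Dict.counter l).values = pvVals l := by
  have : (PySem.Dict.counter l).values = (PySem.Dict.counter l).items.map (·.2) := rfl
  rw [this, PySem.Dict.items_counter, List.map_map]
  rfl

lemma pvBCheck_eq_good (l : List Int) (hne : l ≠ []) :
    pvBCheck (PySem.Dict.counter l) ((l.length : Int)) = pvGood l := by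
  unfold pvBCheck pvGood
  rw [pv_vals_counter]
  have hfreq : ∀ k, (PySem.Dict.counter (pvVals l)).getD k 0 = pvF l k := by
    intro k
    rw [PySem.Dict.getD_counter]
    unfold pvVals pvF
    congr 1
    rw [List.count_eq_countP, List.countP_map]
    apply List.countP_congr
    intro x _
    simp [Function.comp]
  have hvals_ne : pvVals l ≠ [] := by
    unfold pvVals
    simp only [ne_eq, List.map_eq_nil_iff]
    intro hset
    rcases List.exists_mem_of_ne_nil l hne with ⟨x, hx⟩
    have := (PySem.Set.mem_ofList l x).mpr hx
    rw [hset] at this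
    cases this
  have hmax : (match PySem.List.max? (pvVals l) (fun v => v) with
      | some m => m | none => 0) = pvM l := by
    rcases hv : pvVals l with _ | ⟨v, t⟩
    · exact absurd hv hvals_ne
    · rw [PySem.List.max?_id_cons]
      simp only
      unfold pvM
      rw [hv]
      have hvpos : 0 < v := by
        have hvmem : v ∈ pvVals l := by rw [hv]; exact List.mem_cons_self
        unfold pvVals at hvmem
        rcases List.mem_map.mp hvmem with ⟨x, hx, hxv⟩
        have : x ∈ l := (PySem.Set.mem_ofList l x).mp hx
        have : 0 < l.count x := List.count_pos_iff.mpr this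
        omega
      simp only [List.foldl_cons]
      congr 1
      omega
  rw [hmax]
  simp only [hfreq]

lemma pv_downRange_succ (n : Nat) :
    PySem.List.pyRange ((n + 1 : Nat) : Int) 0 (-1) = ((n + 1 : Nat) : Int) :: PySem.List.pyRange ((n : Nat) : Int) 0 (-1) := by
  unfold PySem.List.pyRange
  have h1 : ¬((-1 : Int) = 0) := by decide
  have h2 : ¬((0 : Int) < -1) := by decide
  have h3 : (0 : Int) < ((n + 1 : Nat) : Int) := by positivity
  simp only [if_neg h1, if_neg h2, if_pos h3]
  have hcnt : ((((n + 1 : Nat) : Int) - 0 + -(-1) - 1) / -(-1)).toNat = n + 1 := by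
    simp
  rw [hcnt]
  by_cases hn : n = 0
  · subst hn; decide
  · have h4 : (0 : Int) < ((n : Nat) : Int) := by exact_mod_cast Nat.pos_of_ne_zero hn
    simp only [if_pos h4]
    have hcnt2 : ((((n : Nat) : Int) - 0 + -(-1) - 1) / -(-1)).toNat = n := by simp
    rw [hcnt2, List.range_succ_eq_map, List.map_cons, List.map_map]
    congr 1
    apply List.map_congr_left
    intro k _
    show ((n + 1 : Nat) : Int) + -1 * ((k + 1 : Nat) : Int) = (n : Int) + -1 * (k : Int)
    push_cast; ring

lemma pv_downRange_zero : PySem.List.pyRange ((0 : Nat) : Int) 0 (-1) = [] := by decide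

lemma pvBLoop_eq_best (nums : List Int) :
    ∀ n, n ≤ nums.length → pvBLoop nums (PySem.List.pyRange ((n : Nat) : Int) 0 (-1)) = pvBest nums n := by
  intro n
  induction n with
  | zero => intro _; rw [pv_downRange_zero]; rfl
  | succ m ih =>
    intro hle
    rw [pv_downRange_succ]
    unfold pvBLoop
    have hslice : PySem.List.slice nums none (some ((m + 1 : Nat) : Int)) = nums.take (m + 1) := by
      rw [PySem.List.slice_to nums (by positivity)]
      simp
    have hlen : (nums.take (m + 1)).length = m + 1 := by
      rw [List.length_take]
      omega
    have hne : nums.take (m + 1) ≠ [] := by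
      intro h
      have := hlen
      rw [h] at this
      simp at this
    have hchk : pvBCheck (PySem.Dict.counter (nums.take (m + 1))) ((m + 1 : Nat) : Int)
        = pvGood (nums.take (m + 1)) := by
      have := pvBCheck_eq_good (nums.take (m + 1)) hne
      rw [hlen] at this
      exact this
    rw [hslice, hchk]
    simp only [pvBest]
    by_cases hg : pvGood (nums.take (m + 1))
    · simp [hg]
    · simp only [hg, if_false, Bool.false_eq_true]
      exact ih (Nat.le_of_succ_le hle)

-- ===== VERDICT (by name: the statement is the Claim_ definition above) =====
theorem maxEqualFreq_spec : Claim_equal_maxEqualFreq := by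
  intro nums _
  unfold Spec_maxEqualFreq maxEqualFreq maxEqualFreq_alt
  rw [(pvA_inv nums).2.2.2.1, pvBLoop_eq_best nums nums.length (le_refl _)]
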